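-- pv_equiv track=rewrite | github.com/Nmerryman/ReportServer | src/main.py | sanatize_path
-- ===== SOURCE A (Python) =====
-- def sanatize_path(name: str) -> str:
--     text = ""
--     used_period = False
--     for a in name:
--         if a.isalnum() or a == "_" or (a == "." and not used_period):
--             if a == ".":
--                 used_period = True
--             text += a
--         else:
--             break
--     return text
-- ===== SOURCE B (Python) =====
-- def sanatize_path(name: str) -> str:
--     n = len(name)
--     i_inv = next((i for i, a in enumerate(name)
--                   if not (a.isalnum() or a == "_" or a == ".")), n)
--     dots = [i for i, a in enumerate(name) if a == "."]
--     i_dot2 = dots[1] if len(dots) > 1 else n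
--     return name[:min(i_inv, i_dot2)]
-- ===== Notes on version B (the rewrite author's own statement) =====
-- stated objective: alternative
-- what changed: Replaces the stateful accumulate-until-break loop (used_period flag, text += a) by computing two cut boundaries - the first invalid character and the second dot - and returning a single slice name[:min(i_inv, i_dot2)].
import Mathlib
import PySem

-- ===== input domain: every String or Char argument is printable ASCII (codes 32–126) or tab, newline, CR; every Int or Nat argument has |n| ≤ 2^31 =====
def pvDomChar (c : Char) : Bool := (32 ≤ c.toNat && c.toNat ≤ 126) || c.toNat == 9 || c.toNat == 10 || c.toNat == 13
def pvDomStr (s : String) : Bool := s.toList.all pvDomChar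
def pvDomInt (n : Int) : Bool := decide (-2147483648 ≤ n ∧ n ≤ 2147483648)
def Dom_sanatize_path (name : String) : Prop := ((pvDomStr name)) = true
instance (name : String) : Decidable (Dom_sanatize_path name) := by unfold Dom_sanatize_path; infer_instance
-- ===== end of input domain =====

-- B computes the cut as min(first-invalid-index, second-dot-index) and slices once,
-- instead of A's accumulate-until-break loop with a used_period flag.

-- ===== PORT A =====
-- the for-loop of A: state (text, used_period); 'break' = returning text
def sanatizeGo (cs : List Char) (text : List Char) (up : Bool) : List Char :=
  match cs with
  | [] => text
  | a :: rest =>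
    if PySem.Chars.isalnum a || a == '_' || (a == '.' && !up) then
      sanatizeGo rest (text ++ [a]) (if a == '.' then true else up)
    else text

def sanatize_path (name : String) : String :=
  String.ofList (sanatizeGo name.toList [] false)

-- ===== PORT B =====
def sanatize_path_alt (name : String) : String :=
  let cs := name.toList
  let n : Int := cs.length
  let i_inv : Int :=
    ((PySem.List.enumerate cs 0).find?
      (fun p => !(PySem.Chars.isalnum p.2 || p.2 == '_' || p.2 == '.'))).elim n (·.1)
  let dots : List Int := ((PySem.List.enumerate cs 0).filter (fun p => p.2 == '.')).map (·.1)
  let i_dot2 : Int := if dots.length > 1 then PySem.List.pyGetD dots 1 0 else n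
  String.ofList (PySem.Chars.slice cs none (some (min i_inv i_dot2)))

-- ===== PRECONDITION & SPEC =====
def Spec_sanatize_path (name : String) (out : String) : Prop := out = sanatize_path_alt name
instance (name : String) (out : String) : Decidable (Spec_sanatize_path name out) := by unfold Spec_sanatize_path; infer_instance

-- ===== CLAIM (what is proved, stated in full; the proofs are below) =====
def Claim_equal_sanatize_path : Prop := ∀ (name : String), Dom_sanatize_path name → Spec_sanatize_path name (sanatize_path name)

-- ===== LEMMAS AND PROOFS =====

-- number of chars A keeps, as a function of the used_period state
def pvStop (up : Bool) : List Char → Nat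
  | [] => 0
  | a :: rest =>
    if PySem.Chars.isalnum a || a == '_' || (a == '.' && !up) then
      pvStop (if a == '.' then true else up) rest + 1
    else 0

-- index of the first invalid character (length if none)
def pvInv : List Char → Nat
  | [] => 0
  | a :: rest =>
    if !(PySem.Chars.isalnum a || a == '_' || a == '.') then 0 else pvInv rest + 1

-- index of the first dot (length if none)
def pvD1 : List Char → Nat
  | [] => 0
  | a :: rest => if a == '.' then 0 else pvD1 rest + 1

-- index of the second dot (length if none)
def pvD2 : List Char → Nat
  | [] => 0
  | a :: rest => if a == '.' then pvD1 rest + 1 else pvD2 rest + 1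

theorem pvD1_le (cs : List Char) : pvD1 cs ≤ cs.length := by
  induction cs with
  | nil => simp [pvD1]
  | cons a rest ih =>
    by_cases h : (a == '.') = true <;> simp [pvD1, h]
    omega

theorem pvD2_le (cs : List Char) : pvD2 cs ≤ cs.length := by
  induction cs with
  | nil => simp [pvD2]
  | cons a rest ih =>
    have := pvD1_le rest
    by_cases h : (a == '.') = true <;> simp [pvD2, h] <;> omega

theorem pvGo_eq (cs : List Char) : ∀ text up,
    sanatizeGo cs text up = text ++ cs.take (pvStop up cs) := by
  induction cs with
  | nil => intro text up; simp [sanatizeGo, pvStop]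
  | cons a rest ih =>
    intro text up
    simp only [sanatizeGo, pvStop]
    by_cases h : (PySem.Chars.isalnum a || a == '_' || (a == '.' && !up)) = true
    · simp [h, ih]
    · simp [h]

theorem pvFind_eq (cs : List Char) : ∀ s : Int,
    ((PySem.List.enumerate cs s).find?
      (fun p => !(PySem.Chars.isalnum p.2 || p.2 == '_' || p.2 == '.'))).elim
        (s + cs.length) (·.1) = s + pvInv cs := by
  induction cs with
  | nil => intro s; simp [PySem.List.enumerate_nil, pvInv]
  | cons a rest ih =>
    intro s
    rw [PySem.List.enumerate_cons]
    by_cases h : (!(PySem.Chars.isalnum a || a == '_' || a == '.')) = true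
    · rw [List.find?_cons_of_pos (by simpa using h)]
      simp [pvInv, h]
    · rw [List.find?_cons_of_neg (by simpa using h)]
      simp only [List.length_cons, pvInv, h, Bool.false_eq_true, if_false]
      rw [show s + (((rest.length + 1 : Nat)) : Int) = (s + 1) + (rest.length : Int) by
        push_cast; ring]
      rw [ih (s + 1)]
      push_cast; ring

-- the dots list of B, as a function of the start index
def pvDots (cs : List Char) (s : Int) : List Int :=
  ((PySem.List.enumerate cs s).filter (fun p => p.2 == '.')).map (·.1)

theorem pvDots_cons (a : Char) (rest : List Char) (s : Int) :
    pvDots (a :: rest) s =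
      if a == '.' then s :: pvDots rest (s + 1) else pvDots rest (s + 1) := by
  by_cases h : (a == '.') = true <;>
    simp [pvDots, PySem.List.enumerate_cons, h]

theorem pvDots_get0 (cs : List Char) : ∀ s : Int,
    (pvDots cs s)[0]? = if pvD1 cs < cs.length then some (s + pvD1 cs) else none := by
  induction cs with
  | nil => intro s; simp [pvDots, PySem.List.enumerate_nil, pvD1]
  | cons a rest ih =>
    intro s
    rw [pvDots_cons]
    by_cases h : (a == '.') = true
    · have ha : a = '.' := by simpa using h
      subst ha
      simp [pvD1]
    · have h' : (a == '.') = false := by simpa using h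
      rw [if_neg (by simp [h']), ih (s + 1)]
      simp only [pvD1, h', Bool.false_eq_true, if_false, List.length_cons]
      by_cases h2 : pvD1 rest < rest.length
      · rw [if_pos h2, if_pos (by omega)]
        congr 1; push_cast; ring
      · rw [if_neg h2, if_neg (by omega)]

theorem pvDots_get1 (cs : List Char) : ∀ s : Int,
    (pvDots cs s)[1]? = if pvD2 cs < cs.length then some (s + pvD2 cs) else none := by
  induction cs with
  | nil => intro s; simp [pvDots, PySem.List.enumerate_nil, pvD2]
  | cons a rest ih =>
    intro s
    rw [pvDots_cons]
    by_cases h : (a == '.') = true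
    · have ha : a = '.' := by simpa using h
      subst ha
      rw [if_pos h]
      simp only [List.getElem?_cons_succ, pvDots_get0 rest (s + 1)]
      simp only [pvD2, List.length_cons, h, if_true]
      by_cases h2 : pvD1 rest < rest.length
      · rw [if_pos h2, if_pos (by omega)]
        congr 1; push_cast; ring
      · rw [if_neg h2, if_neg (by omega)]
    · have h' : (a == '.') = false := by simpa using h
      rw [if_neg (by simp [h']), ih (s + 1)]
      simp only [pvD2, h', Bool.false_eq_true, if_false, List.length_cons]
      by_cases h2 : pvD2 rest < rest.length
      · rw [if_pos h2, if_pos (by omega)]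
        congr 1; push_cast; ring
      · rw [if_neg h2, if_neg (by omega)]

-- the key arithmetic: A's stop point is min(first invalid, k-th dot)
theorem pvMin_eq (cs : List Char) :
    min (pvInv cs) (pvD1 cs) = pvStop true cs ∧
    min (pvInv cs) (pvD2 cs) = pvStop false cs := by
  induction cs with
  | nil => simp [pvInv, pvD1, pvD2, pvStop]
  | cons a rest ih =>
    by_cases hd : (a == '.') = true
    · have ha : a = '.' := by simpa using hd
      subst ha
      have e1 : (PySem.Chars.isalnum '.') = false := by decide
      have e2 : (('.' == '_') : Bool) = false := by decide
      have e3 : (('.' == '.') : Bool) = true := by decide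
      have h1 := ih.1
      constructor
      · simp [pvInv, pvD1, pvStop, e1, e2]
      · simp [pvInv, pvD2, pvStop, e1, e2]
        omega
    · have hd' : (a == '.') = false := by simpa using hd
      by_cases hv : (PySem.Chars.isalnum a || a == '_') = true
      · have h1 := ih.1
        have h2 := ih.2
        have hx := hv
        simp only [Bool.or_eq_true] at hx
        rcases hx with hx | hx
        · constructor
          · simp [pvInv, pvD1, pvStop, hd', hx]; omega
          · simp [pvInv, pvD2, pvStop, hd', hx]; omega
        · constructor
          · simp [pvInv, pvD1, pvStop, hd', hx]; omega
          · simp [pvInv, pvD2, pvStop, hd', hx]; omega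
      · have hal : PySem.Chars.isalnum a = false := by
          cases hx : PySem.Chars.isalnum a
          · rfl
          · simp [hx] at hv
        have hus : (a == '_') = false := by
          cases hx : (a == '_')
          · rfl
          · simp [hx] at hv
        constructor <;> simp [pvInv, pvStop, hd', hal, hus]

-- ===== VERDICT (by name: the statement is the Claim_ definition above) =====
theorem sanatize_path_spec : Claim_equal_sanatize_path := by
  intro name _
  unfold Spec_sanatize_path sanatize_path sanatize_path_alt
  rw [pvGo_eq]
  have hinv := pvFind_eq name.toList 0
  simp only [zero_add] at hinv
  have hdots1 := pvDots_get1 name.toList 0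
  simp only [zero_add] at hdots1
  have h2le := pvD2_le name.toList
  have hd2 : (if ((pvDots name.toList 0).length > 1 : Prop) then
        PySem.List.pyGetD (pvDots name.toList 0) 1 0
      else ((name.toList.length : Int))) = (pvD2 name.toList : Int) := by
    by_cases h : pvD2 name.toList < name.toList.length
    · have hsome : (pvDots name.toList 0)[1]? = some (pvD2 name.toList : Int) := by
        rw [hdots1, if_pos h]
      have hlen : 1 < (pvDots name.toList 0).length := by
        by_contra hc
        rw [List.getElem?_eq_none (by omega)] at hsome
        simp at hsome
      have hval : (pvDots name.toList 0)[1] = (pvD2 name.toList : Int) := by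
        have := List.getElem?_eq_getElem hlen
        rw [this] at hsome
        simpa using hsome
      rw [if_pos hlen, PySem.List.pyGetD_ofNat' (pvDots name.toList 0) 1 0,
        List.getD_eq_getElem _ _ hlen, hval]
    · have heq : pvD2 name.toList = name.toList.length := by omega
      have hnone : (pvDots name.toList 0)[1]? = none := by rw [hdots1, if_neg h]
      have hlen : ¬ 1 < (pvDots name.toList 0).length := by
        intro hc
        rw [List.getElem?_eq_getElem hc] at hnone
        simp at hnone
      rw [if_neg hlen, heq]
  simp only [pvDots] at hd2
  simp only [hinv, hd2, List.nil_append]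
  have hmin : min ((pvInv name.toList : Int)) ((pvD2 name.toList : Int))
      = ((min (pvInv name.toList) (pvD2 name.toList) : Nat) : Int) := by omega
  rw [hmin, (pvMin_eq name.toList).2]
  simp [PySem.Chars.slice, PySem.List.slice_to _ (by positivity : (0:Int) ≤ (pvStop false name.toList : Int))]
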